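-- pv_equiv track=rewrite | github.com/Stephen-T-2023/projects-for-potfolio | Connect 4.py | check_diagonal_win
-- ===== SOURCE A (Python) =====
-- def check_diagonal_win(grid, player):
--     for row in range(len(grid) - 3):
--         for col in range(len(grid[0]) - 3):
--             if player == 1:
--                 if all(grid[row + i][col + i] == "B" for i in range(4)):
--                     return True
--             else:
--                 if all(grid[row + i][col + i] == "R" for i in range(4)):
--                     return True
--
--             if player == 1:
--                 if all(grid[row + i][col + 3 - i] == "B" for i in range(4)):
--                     return True
--             else:
--                 if all(grid[row + i][col + 3 - i] == "R" for i in range(4)):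
--                     return True
--
--     return False
-- ===== SOURCE B (Python) =====
-- def check_diagonal_win(grid, player):
--     ch = "B" if player == 1 else "R"
--     rows = len(grid)
--     if rows < 4:
--         return False
--     cols = len(grid[0])
--     if cols < 4:
--         return False
--
--     def has_run(cells):
--         count = 0
--         for v in cells:
--             count = count + 1 if v == ch else 0
--             if count == 4:
--                 return True
--         return False
--
--     # down-right diagonals: start on the top row or the left column
--     starts_dr = [(0, c) for c in range(cols)] + [(r, 0) for r in range(1, rows)]
--     for r, c in starts_dr:
--         if has_run(grid[r + i][c + i] for i in range(min(rows - r, cols - c))):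
--             return True
--     # down-left diagonals: start on the top row or the right column
--     starts_dl = [(0, c) for c in range(cols)] + [(r, cols - 1) for r in range(1, rows)]
--     for r, c in starts_dl:
--         if has_run(grid[r + i][c - i] for i in range(min(rows - r, c + 1))):
--             return True
--     return False
-- ===== Notes on version B (the rewrite author's own statement) =====
-- stated objective: faster
-- what changed: B maps the player to its piece character once, then makes a single pass along each whole diagonal (both directions) keeping a running count of consecutive matches, instead of A's per-cell rescan of every fixed 4-cell diagonal window with the player test repeated inside the loop.
import Mathlib
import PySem

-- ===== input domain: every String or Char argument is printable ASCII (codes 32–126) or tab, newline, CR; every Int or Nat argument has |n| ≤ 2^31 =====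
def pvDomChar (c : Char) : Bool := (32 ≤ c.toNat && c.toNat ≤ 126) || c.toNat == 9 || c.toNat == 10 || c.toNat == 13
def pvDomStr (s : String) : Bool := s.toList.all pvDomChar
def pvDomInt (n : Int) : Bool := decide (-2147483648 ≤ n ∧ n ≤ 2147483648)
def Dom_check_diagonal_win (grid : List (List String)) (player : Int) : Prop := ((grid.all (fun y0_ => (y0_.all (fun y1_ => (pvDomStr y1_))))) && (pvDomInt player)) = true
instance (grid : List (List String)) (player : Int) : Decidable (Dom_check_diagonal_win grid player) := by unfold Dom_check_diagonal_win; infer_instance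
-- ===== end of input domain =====

-- B scans each whole diagonal once with a running count of consecutive matches instead of
-- A's fixed 4-cell window rescan (objective: faster; a timing run measured B faster).

-- ===== PORT A =====
-- grid[r][c] as both Pythons write it; none = IndexError (those inputs are outside Pre_)
def pvCell (grid : List (List String)) (r c : Int) : Option String :=
  (PySem.List.pyGet? grid r).bind (fun row => PySem.List.pyGet? row c)

def check_diagonal_win (grid : List (List String)) (player : Int) : Bool :=
  (PySem.List.pyRange 0 ((grid.length : Int) - 3) 1).any (fun row =>
    (PySem.List.pyRange 0 (((grid.headD []).length : Int) - 3) 1).any (fun col =>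
      ((if player == 1 then
          (PySem.List.pyRange 0 4 1).all (fun i => pvCell grid (row + i) (col + i) == some "B")
        else
          (PySem.List.pyRange 0 4 1).all (fun i => pvCell grid (row + i) (col + i) == some "R"))
       ||
       (if player == 1 then
          (PySem.List.pyRange 0 4 1).all (fun i => pvCell grid (row + i) (col + 3 - i) == some "B")
        else
          (PySem.List.pyRange 0 4 1).all (fun i => pvCell grid (row + i) (col + 3 - i) == some "R")))))

-- ===== PORT B =====
-- Source B's has_run: running count of consecutive cells equal to ch, True at 4
def pvRunGo (ch : String) : List (Option String) → Nat → Bool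
  | [], _ => false
  | v :: rest, count =>
      let count' := if v == some ch then count + 1 else 0
      if count' == 4 then true else pvRunGo ch rest count'

def pvHasRun (ch : String) (cells : List (Option String)) : Bool := pvRunGo ch cells 0

def check_diagonal_win_alt (grid : List (List String)) (player : Int) : Bool :=
  let ch := if player == 1 then "B" else "R"
  let rows : Int := (grid.length : Int)
  if rows < 4 then false
  else
    let cols : Int := ((grid.headD []).length : Int)
    if cols < 4 then false
    else
      let startsDR := (PySem.List.pyRange 0 cols 1).map (fun c => ((0 : Int), c))
                      ++ (PySem.List.pyRange 1 rows 1).map (fun r => (r, (0 : Int)))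
      let startsDL := (PySem.List.pyRange 0 cols 1).map (fun c => ((0 : Int), c))
                      ++ (PySem.List.pyRange 1 rows 1).map (fun r => (r, cols - 1))
      (startsDR.any (fun p =>
          pvHasRun ch ((PySem.List.pyRange 0 (min (rows - p.1) (cols - p.2)) 1).map
            (fun i => pvCell grid (p.1 + i) (p.2 + i)))))
      || (startsDL.any (fun p =>
          pvHasRun ch ((PySem.List.pyRange 0 (min (rows - p.1) (p.2 + 1)) 1).map
            (fun i => pvCell grid (p.1 + i) (p.2 - i)))))

-- ===== PRECONDITION & SPEC =====
-- Pre_ excludes ragged grids of at least 4 rows and 4 columns (rows shorter than row 0):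
-- there Python A usually raises IndexError, and A's occasional early-True/False return depends
-- on how far its window scan got before the short row; B's diagonal walk raises there.
def Pre_check_diagonal_win (grid : List (List String)) (player : Int) : Prop :=
  grid.length < 4 ∨ (grid.headD []).length < 4 ∨ ∀ row ∈ grid, (grid.headD []).length ≤ row.length
instance (grid : List (List String)) (player : Int) : Decidable (Pre_check_diagonal_win grid player) := by unfold Pre_check_diagonal_win; infer_instance

def pvWitness_check_diagonal_win : List (List String) × Int :=
  ([["B", "R", "R", "R"], ["R", "B", "R", "R"], ["R", "R", "B", "R"], ["R", "R", "R", "B"]], 1)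

def Spec_check_diagonal_win (grid : List (List String)) (player : Int) (out : Bool) : Prop := out = check_diagonal_win_alt grid player
instance (grid : List (List String)) (player : Int) (out : Bool) : Decidable (Spec_check_diagonal_win grid player out) := by unfold Spec_check_diagonal_win; infer_instance

-- ===== CLAIM (what is proved, stated in full; the proofs are below) =====
def Claim_equal_check_diagonal_win : Prop := ∀ (grid : List (List String)) (player : Int), Dom_check_diagonal_win grid player → Pre_check_diagonal_win grid player → Spec_check_diagonal_win grid player (check_diagonal_win grid player)

-- ===== LEMMAS AND PROOFS =====

-- the four-in-a-row predicates the two programs detect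
def winDR (grid : List (List String)) (ch : String) (r c : Int) : Prop :=
  ∀ j : Nat, j < 4 → pvCell grid (r + j) (c + j) = some ch
def winDL (grid : List (List String)) (ch : String) (r c : Int) : Prop :=
  ∀ j : Nat, j < 4 → pvCell grid (r + j) (c - j) = some ch

def WinSpec (grid : List (List String)) (ch : String) : Prop :=
  (∃ r c : Int, 0 ≤ r ∧ r + 4 ≤ (grid.length : Int) ∧ 0 ≤ c ∧ c + 4 ≤ ((grid.headD []).length : Int) ∧ winDR grid ch r c) ∨
  (∃ r c : Int, 0 ≤ r ∧ r + 4 ≤ (grid.length : Int) ∧ 3 ≤ c ∧ c < ((grid.headD []).length : Int) ∧ winDL grid ch r c)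


-- sliding-window characterisation used to reason about has_run
def pvHW (ch : String) : List (Option String) → Bool
  | a :: b :: c :: d :: t =>
      ((a == some ch) && (b == some ch) && (c == some ch) && (d == some ch)) || pvHW ch (b :: c :: d :: t)
  | _ => false

theorem pvHW_skip0 (ch : String) (v : Option String) (rest : List (Option String))
    (hv : (v == some ch) = false) : pvHW ch (v :: rest) = pvHW ch rest := by
  match rest with
  | [] => simp [pvHW]
  | [c] => simp [pvHW]
  | [c, d] => simp [pvHW]
  | c :: d :: e :: t => simp [pvHW, hv]

theorem pvHW_skip1 (ch : String) (a v : Option String) (rest : List (Option String))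
    (hv : (v == some ch) = false) : pvHW ch (a :: v :: rest) = pvHW ch rest := by
  match rest with
  | [] => simp [pvHW]
  | [d] => simp [pvHW]
  | d :: e :: t => simp [pvHW, hv, pvHW_skip0 ch v _ hv]

theorem pvHW_skip2 (ch : String) (a b v : Option String) (rest : List (Option String))
    (hv : (v == some ch) = false) : pvHW ch (a :: b :: v :: rest) = pvHW ch rest := by
  match rest with
  | [] => simp [pvHW]
  | e :: t => simp [pvHW, hv, pvHW_skip1 ch b v _ hv]

theorem pvHW_skip3 (ch : String) (a b c v : Option String) (rest : List (Option String))
    (hv : (v == some ch) = false) : pvHW ch (a :: b :: c :: v :: rest) = pvHW ch rest := by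
  simp [pvHW, hv, pvHW_skip2 ch b c v _ hv]

theorem pvRunGo_eq_pvHW (ch : String) :
    ∀ (cells : List (Option String)) (count : Nat), count ≤ 3 →
      pvRunGo ch cells count = pvHW ch (List.replicate count (some ch) ++ cells) := by
  intro cells
  induction cells with
  | nil =>
      intro count hc
      interval_cases count <;> simp [pvRunGo, pvHW, List.replicate]
  | cons v rest ih =>
      intro count hc
      by_cases hv : (v == some ch) = true
      · have hv' : v = some ch := by simpa [beq_iff_eq] using hv
        by_cases h3 : count = 3
        · subst h3
          simp [pvRunGo, List.replicate, pvHW, hv']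
        · have hlt : count + 1 ≤ 3 := by omega
          have : pvRunGo ch (v :: rest) count = pvRunGo ch rest (count + 1) := by
            simp [pvRunGo, hv]
            omega
          rw [this, ih (count + 1) hlt, hv',
            show List.replicate count (some ch) ++ some ch :: rest
                = List.replicate (count + 1) (some ch) ++ rest by
              rw [List.replicate_succ']; simp]
      · have hv' : (v == some ch) = false := by simpa using hv
        have : pvRunGo ch (v :: rest) count = pvRunGo ch rest 0 := by
          simp [pvRunGo, hv']
        rw [this, ih 0 (by omega)]
        match count, hc with
        | 0, _ => exact (pvHW_skip0 ch v rest hv').symm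
        | 1, _ => exact (pvHW_skip1 ch (some ch) v rest hv').symm
        | 2, _ => exact (pvHW_skip2 ch (some ch) (some ch) v rest hv').symm
        | 3, _ => exact (pvHW_skip3 ch (some ch) (some ch) (some ch) v rest hv').symm

theorem pvHW_iff (ch : String) :
    ∀ cells : List (Option String),
      pvHW ch cells = true ↔
        ∃ k : Nat, k + 4 ≤ cells.length ∧ ∀ j : Nat, j < 4 → cells.getD (k + j) none = some ch := by
  intro cells
  induction cells with
  | nil => simp [pvHW]
  | cons a l ih =>
      match l, ih with
      | [], _ => simp [pvHW]
      | [b], _ => simp [pvHW]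
      | [b, c], _ => simp [pvHW]
      | b :: c :: d :: t, ih =>
          have heq : pvHW ch (a :: b :: c :: d :: t)
              = (((a == some ch) && (b == some ch) && (c == some ch) && (d == some ch))
                 || pvHW ch (b :: c :: d :: t)) := by simp [pvHW]
          rw [heq, Bool.or_eq_true]
          constructor
          · rintro (h0 | hrec)
            · simp only [Bool.and_eq_true, beq_iff_eq] at h0
              obtain ⟨⟨⟨ha, hb⟩, hc⟩, hd⟩ := h0
              refine ⟨0, by simp, ?_⟩
              intro j hj
              interval_cases j <;> simp [ha, hb, hc, hd]
            · obtain ⟨k, hk, hcell⟩ := ih.mp hrec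
              refine ⟨k + 1, by simp at hk ⊢; omega, ?_⟩
              intro j hj
              have h := hcell j hj
              rw [show k + 1 + j = (k + j) + 1 from by omega, List.getD_cons_succ]
              exact h
          · rintro ⟨k, hk, hcell⟩
            cases k with
            | zero =>
                left
                simp only [Bool.and_eq_true, beq_iff_eq]
                have h0 := hcell 0 (by omega)
                have h1 := hcell 1 (by omega)
                have h2 := hcell 2 (by omega)
                have h3 := hcell 3 (by omega)
                simp at h0 h1 h2 h3
                exact ⟨⟨⟨h0, h1⟩, h2⟩, h3⟩
            | succ k' =>
                right
                refine ih.mpr ⟨k', by simp at hk ⊢; omega, ?_⟩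
                intro j hj
                have h := hcell j hj
                rwa [show k' + 1 + j = (k' + j) + 1 from by omega, List.getD_cons_succ] at h

theorem pvHasRun_map_iff (ch : String) (f : Int → Option String) (L : Int) :
    pvHasRun ch ((PySem.List.pyRange 0 L 1).map f) = true ↔
      ∃ k : Nat, (k : Int) + 4 ≤ L ∧ ∀ j : Nat, j < 4 → f ((k : Int) + (j : Int)) = some ch := by
  have hrw : pvHasRun ch ((PySem.List.pyRange 0 L 1).map f)
      = pvHW ch ((PySem.List.pyRange 0 L 1).map f) := by
    have := pvRunGo_eq_pvHW ch ((PySem.List.pyRange 0 L 1).map f) 0 (by omega)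
    simpa [pvHasRun] using this
  rw [hrw, pvHW_iff]
  have hlen : ((PySem.List.pyRange 0 L 1).map f).length = (L - 0).toNat := by
    simp [PySem.List.length_pyRange_one]
  constructor
  · rintro ⟨k, hk, hcell⟩
    rw [hlen] at hk
    refine ⟨k, by omega, ?_⟩
    intro j hj
    have h := hcell j hj
    have hlt : ((k + j : Nat) : Int) < L := by push_cast; omega
    have hg := PySem.List.pyGetD_map_pyRange_of_nonneg f L ((k + j : Nat) : Int) (none : Option String) (by positivity) hlt
    rw [PySem.List.pyGetD_of_nonneg _ _ (by positivity), Int.toNat_natCast] at hg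
    rw [hg] at h
    simpa [Nat.cast_add] using h
  · rintro ⟨k, hk, hcell⟩
    refine ⟨k, by rw [hlen]; omega, ?_⟩
    intro j hj
    have hlt : ((k + j : Nat) : Int) < L := by push_cast; omega
    have hg := PySem.List.pyGetD_map_pyRange_of_nonneg f L ((k + j : Nat) : Int) (none : Option String) (by positivity) hlt
    rw [PySem.List.pyGetD_of_nonneg _ _ (by positivity), Int.toNat_natCast] at hg
    rw [hg]
    have h := hcell j hj
    simpa [Nat.cast_add] using h


-- A's scan with the player already resolved to its character
def aCore (grid : List (List String)) (ch : String) : Bool :=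
  (PySem.List.pyRange 0 ((grid.length : Int) - 3) 1).any (fun row =>
    (PySem.List.pyRange 0 (((grid.headD []).length : Int) - 3) 1).any (fun col =>
      ((PySem.List.pyRange 0 4 1).all (fun i => pvCell grid (row + i) (col + i) == some ch)
       || (PySem.List.pyRange 0 4 1).all (fun i => pvCell grid (row + i) (col + 3 - i) == some ch))))

-- B's scan with the player already resolved to its character
def bCore (grid : List (List String)) (ch : String) : Bool :=
  if (grid.length : Int) < 4 then false
  else if ((grid.headD []).length : Int) < 4 then false
  else
    ((((PySem.List.pyRange 0 ((grid.headD []).length : Int) 1).map (fun c => ((0 : Int), c))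
       ++ (PySem.List.pyRange 1 (grid.length : Int) 1).map (fun r => (r, (0 : Int)))).any (fun p =>
        pvHasRun ch ((PySem.List.pyRange 0 (min ((grid.length : Int) - p.1) (((grid.headD []).length : Int) - p.2)) 1).map
          (fun i => pvCell grid (p.1 + i) (p.2 + i)))))
     ||
     (((PySem.List.pyRange 0 ((grid.headD []).length : Int) 1).map (fun c => ((0 : Int), c))
       ++ (PySem.List.pyRange 1 (grid.length : Int) 1).map (fun r => (r, ((grid.headD []).length : Int) - 1))).any (fun p =>
        pvHasRun ch ((PySem.List.pyRange 0 (min ((grid.length : Int) - p.1) (p.2 + 1)) 1).map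
          (fun i => pvCell grid (p.1 + i) (p.2 - i))))))

theorem A_eq_aCore (grid : List (List String)) (player : Int) :
    check_diagonal_win grid player = aCore grid (if player == 1 then "B" else "R") := by
  cases hp : player == 1 <;> simp [check_diagonal_win, aCore, hp]

theorem B_eq_bCore (grid : List (List String)) (player : Int) :
    check_diagonal_win_alt grid player = bCore grid (if player == 1 then "B" else "R") := rfl

theorem pvAll4_iff (ch : String) (f : Int → Option String) :
    ((PySem.List.pyRange 0 4 1).all (fun i => f i == some ch)) = true ↔
      (∀ j : Nat, j < 4 → f (j : Int) = some ch) := by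
  have h4 : PySem.List.pyRange 0 4 1 = [0, 1, 2, 3] := by decide
  rw [h4]
  simp only [List.all_cons, List.all_nil, Bool.and_eq_true, beq_iff_eq, Bool.and_true]
  constructor
  · rintro ⟨h0, h1, h2, h3⟩ j hj
    interval_cases j
    · simpa using h0
    · simpa using h1
    · simpa using h2
    · simpa using h3
  · intro h
    refine ⟨?_, ?_, ?_, ?_⟩
    · simpa using h 0 (by omega)
    · simpa using h 1 (by omega)
    · simpa using h 2 (by omega)
    · simpa using h 3 (by omega)

theorem aCore_iff (grid : List (List String)) (ch : String) :
    aCore grid ch = true ↔ WinSpec grid ch := by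
  unfold aCore WinSpec
  simp only [List.any_eq_true, PySem.List.mem_pyRange_one, Bool.or_eq_true]
  constructor
  · rintro ⟨row, ⟨h0r, hrR⟩, col, ⟨h0c, hcC⟩, hwin | hwin⟩
    · exact Or.inl ⟨row, col, h0r, by omega, h0c, by omega,
        (pvAll4_iff ch (fun i => pvCell grid (row + i) (col + i))).mp hwin⟩
    · exact Or.inr ⟨row, col + 3, h0r, by omega, by omega, by omega,
        (pvAll4_iff ch (fun i => pvCell grid (row + i) (col + 3 - i))).mp hwin⟩
  · rintro (⟨r, c, h0r, hr4, h0c, hc4, hwin⟩ | ⟨r, c, h0r, hr4, h3c, hcC, hwin⟩)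
    · exact ⟨r, ⟨h0r, by omega⟩, c, ⟨h0c, by omega⟩,
        Or.inl ((pvAll4_iff ch (fun i => pvCell grid (r + i) (c + i))).mpr hwin)⟩
    · refine ⟨r, ⟨h0r, by omega⟩, c - 3, ⟨by omega, by omega⟩,
        Or.inr ((pvAll4_iff ch (fun i => pvCell grid (r + i) (c - 3 + 3 - i))).mpr ?_)⟩
      intro j hj
      have h := hwin j hj
      simpa [show c - 3 + 3 - (j : Int) = c - (j : Int) from by ring] using h

theorem bDR_iff (grid : List (List String)) (ch : String) :
    (((PySem.List.pyRange 0 ((grid.headD []).length : Int) 1).map (fun c => ((0 : Int), c))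
      ++ (PySem.List.pyRange 1 (grid.length : Int) 1).map (fun r => (r, (0 : Int)))).any (fun p =>
        pvHasRun ch ((PySem.List.pyRange 0 (min ((grid.length : Int) - p.1) (((grid.headD []).length : Int) - p.2)) 1).map
          (fun i => pvCell grid (p.1 + i) (p.2 + i))))) = true ↔
    (∃ r c : Int, 0 ≤ r ∧ r + 4 ≤ (grid.length : Int) ∧ 0 ≤ c ∧ c + 4 ≤ ((grid.headD []).length : Int) ∧ winDR grid ch r c) := by
  simp only [List.any_eq_true, List.mem_append, List.mem_map, PySem.List.mem_pyRange_one]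
  constructor
  · rintro ⟨p, ⟨c0, ⟨h0c, hcC⟩, rfl⟩ | ⟨r0, ⟨h1r, hrR⟩, rfl⟩, hrun⟩ <;>
      obtain ⟨k, hk, hcell⟩ := (pvHasRun_map_iff ch _ _).mp hrun <;>
      rw [le_min_iff] at hk
    · refine ⟨0 + (k : Int), c0 + (k : Int), by omega, by omega, by omega, by omega, ?_⟩
      intro j hj
      have h := hcell j hj
      simpa [add_assoc] using h
    · refine ⟨r0 + (k : Int), 0 + (k : Int), by omega, by omega, by omega, by omega, ?_⟩
      intro j hj
      have h := hcell j hj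
      simpa [add_assoc] using h
  · rintro ⟨r, c, h0r, hr4, h0c, hc4, hwin⟩
    by_cases hrc : r ≤ c
    · refine ⟨(0, c - r), Or.inl ⟨c - r, ⟨by omega, by omega⟩, rfl⟩, ?_⟩
      refine (pvHasRun_map_iff ch _ _).mpr ⟨r.toNat, ?_, ?_⟩
      · rw [le_min_iff]; omega
      · intro j hj
        have h := hwin j hj
        have hr : ((r.toNat : Int)) = r := Int.toNat_of_nonneg h0r
        simpa [hr, show (0 : Int) + (r + (j : Int)) = r + (j : Int) from by ring,
          show c - r + (r + (j : Int)) = c + (j : Int) from by ring] using h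
    · refine ⟨(r - c, 0), Or.inr ⟨r - c, ⟨by omega, by omega⟩, rfl⟩, ?_⟩
      refine (pvHasRun_map_iff ch _ _).mpr ⟨c.toNat, ?_, ?_⟩
      · rw [le_min_iff]; omega
      · intro j hj
        have h := hwin j hj
        have hc : ((c.toNat : Int)) = c := Int.toNat_of_nonneg h0c
        simpa [hc, show r - c + (c + (j : Int)) = r + (j : Int) from by ring,
          show (0 : Int) + (c + (j : Int)) = c + (j : Int) from by ring] using h

theorem bDL_iff (grid : List (List String)) (ch : String) :
    (((PySem.List.pyRange 0 ((grid.headD []).length : Int) 1).map (fun c => ((0 : Int), c))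
      ++ (PySem.List.pyRange 1 (grid.length : Int) 1).map (fun r => (r, ((grid.headD []).length : Int) - 1))).any (fun p =>
        pvHasRun ch ((PySem.List.pyRange 0 (min ((grid.length : Int) - p.1) (p.2 + 1)) 1).map
          (fun i => pvCell grid (p.1 + i) (p.2 - i))))) = true ↔
    (∃ r c : Int, 0 ≤ r ∧ r + 4 ≤ (grid.length : Int) ∧ 3 ≤ c ∧ c < ((grid.headD []).length : Int) ∧ winDL grid ch r c) := by
  simp only [List.any_eq_true, List.mem_append, List.mem_map, PySem.List.mem_pyRange_one]
  constructor
  · rintro ⟨p, ⟨c0, ⟨h0c, hcC⟩, rfl⟩ | ⟨r0, ⟨h1r, hrR⟩, rfl⟩, hrun⟩ <;>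
      obtain ⟨k, hk, hcell⟩ := (pvHasRun_map_iff ch _ _).mp hrun <;>
      rw [le_min_iff] at hk
    · refine ⟨0 + (k : Int), c0 - (k : Int), by omega, by omega, by omega, by omega, ?_⟩
      intro j hj
      have h := hcell j hj
      simpa [add_assoc, sub_sub] using h
    · refine ⟨r0 + (k : Int), ((grid.headD []).length : Int) - 1 - (k : Int), by omega, by omega, by omega, by omega, ?_⟩
      intro j hj
      have h := hcell j hj
      simpa [add_assoc, sub_sub] using h
  · rintro ⟨r, c, h0r, hr4, h3c, hcC, hwin⟩
    by_cases hrc : r + c ≤ ((grid.headD []).length : Int) - 1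
    · refine ⟨(0, c + r), Or.inl ⟨c + r, ⟨by omega, by omega⟩, rfl⟩, ?_⟩
      refine (pvHasRun_map_iff ch _ _).mpr ⟨r.toNat, ?_, ?_⟩
      · rw [le_min_iff]; omega
      · intro j hj
        have h := hwin j hj
        have hr : ((r.toNat : Int)) = r := Int.toNat_of_nonneg h0r
        simpa [hr, show (0 : Int) + (r + (j : Int)) = r + (j : Int) from by ring,
          show c + r - (r + (j : Int)) = c - (j : Int) from by ring] using h
    · refine ⟨(r + c - (((grid.headD []).length : Int) - 1), ((grid.headD []).length : Int) - 1),
        Or.inr ⟨r + c - (((grid.headD []).length : Int) - 1), ⟨by omega, by omega⟩, rfl⟩, ?_⟩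
      refine (pvHasRun_map_iff ch _ _).mpr ⟨(((grid.headD []).length : Int) - 1 - c).toNat, ?_, ?_⟩
      · rw [le_min_iff]; omega
      · intro j hj
        have h := hwin j hj
        have hA : r + c - (((grid.headD []).length : Int) - 1)
            + (((((grid.headD []).length : Int) - 1 - c).toNat : Int) + (j : Int)) = r + (j : Int) := by omega
        have hB : ((grid.headD []).length : Int) - 1
            - (((((grid.headD []).length : Int) - 1 - c).toNat : Int) + (j : Int)) = c - (j : Int) := by omega
        rw [hA, hB]
        exact h

theorem bCore_iff (grid : List (List String)) (ch : String) :
    bCore grid ch = true ↔ WinSpec grid ch := by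
  unfold bCore
  split_ifs with h1 h2
  · simp only [false_iff]
    rintro (⟨r, c, h0r, hr4, _⟩ | ⟨r, c, h0r, hr4, _⟩) <;> omega
  · simp only [false_iff]
    rintro (⟨r, c, h0r, hr4, h0c, hc4, _⟩ | ⟨r, c, h0r, hr4, h3c, hcC, _⟩) <;> omega
  · unfold WinSpec
    rw [Bool.or_eq_true, bDR_iff, bDL_iff]

theorem coreEq (grid : List (List String)) (ch : String) : aCore grid ch = bCore grid ch := by
  have h := (aCore_iff grid ch).trans (bCore_iff grid ch).symm
  cases ha : aCore grid ch <;> cases hb : bCore grid ch <;> simp_all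

theorem check_diagonal_win_spec : Claim_equal_check_diagonal_win := by
  intro grid player _ _
  unfold Spec_check_diagonal_win
  rw [A_eq_aCore, B_eq_bCore, coreEq]
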